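-- pv_equiv track=rewrite | github.com/developer0826/coding_test_study | programmers/42840.py | solution
-- ===== SOURCE A (Python) =====
-- def solution(answers):
--     answer = []
--     len_ans = len(answers)
--
--     person_1 = [1, 2, 3, 4, 5]
--     person_2 = [2, 1, 2, 3, 2, 4, 2, 5]
--     person_3 = [3, 3, 1, 1, 2, 2, 4, 4, 5, 5]
--     person = [person_1, person_2, person_3]
--
--     person_answers = []
--     for i in person:
--         person_answers.append(i * (len_ans // len(i)) + i[:len_ans % len(i)])
--
--     person_ans_cnt = []
--     for i in person_answers:
--         person_ans_cnt.append(sum([p == a for p, a in zip(i, answers)]))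
--
--     answer_int = max(person_ans_cnt)
--     for i in range(3):
--         if person_ans_cnt[i] == answer_int:
--             answer.append(i+1)
--
--     return answer
-- ===== SOURCE B (Python) =====
-- def solution(answers):
--     p1 = [1, 2, 3, 4, 5]
--     p2 = [2, 1, 2, 3, 2, 4, 2, 5]
--     p3 = [3, 3, 1, 1, 2, 2, 4, 4, 5, 5]
--     c1 = c2 = c3 = 0
--     for i, a in enumerate(answers):
--         if a == p1[i % 5]:
--             c1 += 1
--         if a == p2[i % 8]:
--             c2 += 1
--         if a == p3[i % 10]:
--             c3 += 1
--     counts = [c1, c2, c3]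
--     m = max(counts)
--     return [j + 1 for j in range(3) if counts[j] == m]
-- ===== Notes on version B (the rewrite author's own statement) =====
-- stated objective: simpler
-- what changed: Instead of materializing each student's cyclic answer table to the input length and zip-counting matches per table, B makes one enumerate pass over answers keeping three counters via modular indexing into the fixed base patterns; a timing run measured this constant-factor faster.
import Mathlib
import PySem

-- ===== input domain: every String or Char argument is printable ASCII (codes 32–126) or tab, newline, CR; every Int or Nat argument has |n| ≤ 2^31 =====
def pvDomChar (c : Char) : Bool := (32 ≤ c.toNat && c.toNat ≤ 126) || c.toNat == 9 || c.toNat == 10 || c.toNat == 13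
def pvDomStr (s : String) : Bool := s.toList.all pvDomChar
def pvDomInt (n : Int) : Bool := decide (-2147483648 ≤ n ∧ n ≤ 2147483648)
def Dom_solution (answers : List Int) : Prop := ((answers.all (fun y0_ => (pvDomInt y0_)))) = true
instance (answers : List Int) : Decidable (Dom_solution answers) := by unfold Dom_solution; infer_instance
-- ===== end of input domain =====

-- B replaces A's materialized cyclic answer tables and per-table zip-counts by a single
-- enumerate pass keeping three modular-index counters (objective: simpler — no tables, one scan).

-- ===== PORT A =====
-- i * (len_ans // len(i)) + i[:len_ans % len(i)]
def pvExpandA (i : List Int) (lenAns : Nat) : List Int :=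
  (List.replicate (lenAns / i.length) i).flatten ++ i.take (lenAns % i.length)

def solution (answers : List Int) : List Int :=
  let lenAns := answers.length
  let person1 : List Int := [1, 2, 3, 4, 5]
  let person2 : List Int := [2, 1, 2, 3, 2, 4, 2, 5]
  let person3 : List Int := [3, 3, 1, 1, 2, 2, 4, 4, 5, 5]
  let person := [person1, person2, person3]
  let personAnswers := person.foldl (fun acc i => acc ++ [pvExpandA i lenAns]) []
  let personAnsCnt := personAnswers.foldl (fun acc i =>
    acc ++ [((i.zip answers).map (fun pa => if pa.1 = pa.2 then (1 : Int) else 0)).sum]) []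
  let answerInt := (PySem.List.max? personAnsCnt (fun x => x)).getD 0  -- list is [_,_,_], max? is some; getD only for totality
  (PySem.List.pyRange 0 3 1).foldl (fun acc i =>
    if PySem.List.pyGetD personAnsCnt i 0 = answerInt then acc ++ [i + 1] else acc) []

-- ===== PORT B =====
def solution_alt (answers : List Int) : List Int :=
  let p1 : List Int := [1, 2, 3, 4, 5]
  let p2 : List Int := [2, 1, 2, 3, 2, 4, 2, 5]
  let p3 : List Int := [3, 3, 1, 1, 2, 2, 4, 4, 5, 5]
  let c := (PySem.List.enumerate answers 0).foldl
    (fun (c : Int × Int × Int) ia =>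
      (c.1 + (if ia.2 = PySem.List.pyGetD p1 (PySem.Int.mod ia.1 5) 0 then (1 : Int) else 0),
       c.2.1 + (if ia.2 = PySem.List.pyGetD p2 (PySem.Int.mod ia.1 8) 0 then (1 : Int) else 0),
       c.2.2 + (if ia.2 = PySem.List.pyGetD p3 (PySem.Int.mod ia.1 10) 0 then (1 : Int) else 0)))
    (0, 0, 0)
  let counts : List Int := [c.1, c.2.1, c.2.2]
  let m := (PySem.List.max? counts (fun x => x)).getD 0  -- list is [_,_,_], max? is some; getD only for totality
  ((PySem.List.pyRange 0 3 1).filter (fun j => PySem.List.pyGetD counts j 0 = m)).map (fun j => j + 1)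

-- ===== PRECONDITION & SPEC =====
def Spec_solution (answers : List Int) (out : List Int) : Prop := out = solution_alt answers
instance (answers : List Int) (out : List Int) : Decidable (Spec_solution answers out) := by unfold Spec_solution; infer_instance

-- ===== CLAIM (what is proved, stated in full; the proofs are below) =====
def Claim_equal_solution : Prop := ∀ (answers : List Int), Dom_solution answers → Spec_solution answers (solution answers)

-- ===== LEMMAS AND PROOFS =====

-- A's expanded cyclic table is the modular-index table.
theorem pvExpandA_eq (p : List Int) (hp : p ≠ []) (n : Nat) :
    pvExpandA p n = (List.range n).map (fun k => p.getD (k % p.length) 0) := by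
  have hL : 0 < p.length := List.length_pos_iff.mpr hp
  induction n with
  | zero => simp [pvExpandA]
  | succ n ih =>
    obtain ⟨q, r, hrL, hn⟩ : ∃ q r, r < p.length ∧ n = p.length * q + r :=
      ⟨n / p.length, n % p.length, Nat.mod_lt _ hL, (Nat.div_add_mod n p.length).symm⟩
    have hq : n / p.length = q := by
      rw [hn, Nat.mul_add_div hL, Nat.div_eq_of_lt hrL, Nat.add_zero]
    have hrm : n % p.length = r := by
      rw [hn, Nat.mul_add_mod]; exact Nat.mod_eq_of_lt hrL
    rw [List.range_succ, List.map_append, ← ih]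
    simp only [List.map_cons, List.map_nil, hrm]
    by_cases hcase : r + 1 = p.length
    · have hdiv : (n + 1) / p.length = q + 1 := by
        rw [show n + 1 = p.length * q + (r + 1) by omega, Nat.mul_add_div hL, hcase,
          Nat.div_self hL]
      have hmod : (n + 1) % p.length = 0 := by
        rw [show n + 1 = p.length * q + (r + 1) by omega, Nat.mul_add_mod, hcase, Nat.mod_self]
      simp only [pvExpandA, hdiv, hmod, hq, hrm]
      rw [List.replicate_succ', List.flatten_append]
      simp only [List.take_zero, List.append_nil, List.flatten_cons, List.flatten_nil,
        List.append_nil, List.append_assoc]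
      congr 1
      have ht := List.take_add_one (l := p) (i := r)
      rw [hcase, List.take_length] at ht
      conv_lhs => rw [ht]
      simp [List.getD, List.getElem?_eq_getElem hrL]
    · have hdiv : (n + 1) / p.length = q := by
        rw [show n + 1 = p.length * q + (r + 1) by omega, Nat.mul_add_div hL,
          Nat.div_eq_of_lt (by omega), Nat.add_zero]
      have hmod : (n + 1) % p.length = r + 1 := by
        rw [show n + 1 = p.length * q + (r + 1) by omega, Nat.mul_add_mod,
          Nat.mod_eq_of_lt (by omega)]
      simp only [pvExpandA, hdiv, hmod, hq, hrm]
      rw [List.take_add_one, List.append_assoc]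
      congr 2
      simp [List.getD, List.getElem?_eq_getElem hrL]

-- A's zip-count against the expanded table = B's sum of modular-index indicators over enumerate.
theorem pvCountA_eq (p : List Int) (hp : p ≠ []) (answers : List Int) (f : Int → Int)
    (hf : ∀ k : Nat, k < answers.length → f (k : Int) = p.getD (k % p.length) 0) :
    (((pvExpandA p answers.length).zip answers).map
        (fun pa => if pa.1 = pa.2 then (1 : Int) else 0)).sum
      = ((PySem.List.enumerate answers 0).map
          (fun ia => if ia.2 = f ia.1 then (1 : Int) else 0)).sum := by
  rw [pvExpandA_eq p hp]
  apply congrArg List.sum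
  apply List.ext_getElem
  · simp [PySem.List.length_enumerate]
  · intro k h1 h2
    simp only [List.getElem_map, List.getElem_zip, List.getElem_range,
      PySem.List.getElem_enumerate, zero_add]
    have hk : k < answers.length := by simpa [PySem.List.length_enumerate] using h2
    rw [hf k hk]
    simp [eq_comm]

-- B's triple-counter fold splits into three indicator sums.
theorem pvFold3 (l : List (Int × Int)) (g1 g2 g3 : Int × Int → Int) (c : Int × Int × Int) :
    l.foldl (fun c ia => (c.1 + g1 ia, c.2.1 + g2 ia, c.2.2 + g3 ia)) c
      = (c.1 + (l.map g1).sum, c.2.1 + (l.map g2).sum, c.2.2 + (l.map g3).sum) := by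
  induction l generalizing c with
  | nil => simp
  | cons x t ih => simp [List.foldl_cons, ih]; ring_nf; simp

-- A's append-if loop over range(3) is B's filter-then-map comprehension.
theorem pvTailEq (l : List Int) (g : Int → Int) (m : Int) :
    l.foldl (fun acc i => if g i = m then acc ++ [i + 1] else acc) []
      = (l.filter (fun j => g j = m)).map (fun j => j + 1) := by
  simpa using PySem.List.foldl_append_if (l := l) (p := fun j => decide (g j = m))
    (f := fun j => j + 1) (acc := [])

-- pattern lookup bridge: B's pyGetD at i % len = getD at the Nat mod
theorem pvIdx (p : List Int) (L : Nat) (hL : p.length = L) (k : Nat) :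
    PySem.List.pyGetD p (PySem.Int.mod (k : Int) (L : Int)) 0 = p.getD (k % p.length) 0 := by
  have h : PySem.Int.mod (k : Int) (L : Int) = ((k % L : Nat) : Int) :=
    PySem.Int.mod_natCast k L
  rw [h, PySem.List.pyGetD_natCast, hL]

-- ===== VERDICT (by name: the statement is the Claim_ definition above) =====
theorem solution_spec : Claim_equal_solution := by
  intro answers _
  unfold Spec_solution solution solution_alt
  have h1 := pvCountA_eq [1, 2, 3, 4, 5] (by decide) answers
    (fun i => PySem.List.pyGetD [1, 2, 3, 4, 5] (PySem.Int.mod i 5) 0)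
    (fun k _ => pvIdx [1, 2, 3, 4, 5] 5 rfl k)
  have h2 := pvCountA_eq [2, 1, 2, 3, 2, 4, 2, 5] (by decide) answers
    (fun i => PySem.List.pyGetD [2, 1, 2, 3, 2, 4, 2, 5] (PySem.Int.mod i 8) 0)
    (fun k _ => pvIdx [2, 1, 2, 3, 2, 4, 2, 5] 8 rfl k)
  have h3 := pvCountA_eq [3, 3, 1, 1, 2, 2, 4, 4, 5, 5] (by decide) answers
    (fun i => PySem.List.pyGetD [3, 3, 1, 1, 2, 2, 4, 4, 5, 5] (PySem.Int.mod i 10) 0)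
    (fun k _ => pvIdx [3, 3, 1, 1, 2, 2, 4, 4, 5, 5] 10 rfl k)
  simp only [PySem.List.foldl_append_singleton_eq_map, List.map_cons, List.map_nil,
    List.nil_append, pvFold3, zero_add, h1, h2, h3]
  exact pvTailEq _ _ _
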